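-- pv_equiv track=rewrite | github.com/hernanjkd/interview-questions | divide-3-a.py | same_a
-- ===== SOURCE A (Python) =====
-- def same_a(lst):
--     count = None
--     for x in lst:
--         if count is None:
--             count = x.count('a')
--         if x.count('a') != count:
--             return False
--     return True
-- ===== SOURCE B (Python) =====
-- def same_a(lst):
--     counts = [x.count('a') for x in lst]
--     return counts[1:] == counts[:-1]
-- ===== Notes on version B (the rewrite author's own statement) =====
-- stated objective: alternative
-- what changed: B builds the list of 'a'-counts and compares it elementwise against its own one-position shift (counts[1:] == counts[:-1]), relying on transitivity of adjacent equality, instead of A's loop keeping one reference count with early-exit comparison.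
import Mathlib
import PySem

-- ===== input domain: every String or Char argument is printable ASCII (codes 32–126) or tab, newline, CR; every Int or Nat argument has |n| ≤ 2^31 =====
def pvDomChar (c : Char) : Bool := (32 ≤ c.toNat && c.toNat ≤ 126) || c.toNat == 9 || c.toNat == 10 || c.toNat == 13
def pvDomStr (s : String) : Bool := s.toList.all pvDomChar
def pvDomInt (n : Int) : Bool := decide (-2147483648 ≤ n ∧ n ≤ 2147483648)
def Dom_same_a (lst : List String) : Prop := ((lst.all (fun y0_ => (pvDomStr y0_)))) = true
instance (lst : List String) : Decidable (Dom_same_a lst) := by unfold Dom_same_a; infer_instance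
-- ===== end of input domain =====

-- B compares the counts list against its own one-position shift (counts[1:] == counts[:-1]); A keeps one reference count with early exit. Same cost, different strategy.

-- ===== PORT A =====
-- A's for-loop: `count` is None before the first iteration, then the first element's count
def same_aLoop : List String → Option Nat → Bool
  | [], _ => true
  | x :: xs, count =>
    let count := match count with
      | none => PySem.Str.count x "a"
      | some c => c
    if PySem.Str.count x "a" ≠ count then false
    else same_aLoop xs (some count)

def same_a (lst : List String) : Bool := same_aLoop lst none

-- ===== PORT B =====
def same_a_alt (lst : List String) : Bool :=
  let counts := lst.map (fun x => PySem.Str.count x "a")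
  decide (PySem.List.slice counts (some 1) none = PySem.List.slice counts none (some (-1)))

-- ===== PRECONDITION & SPEC =====
def Spec_same_a (lst : List String) (out : Bool) : Prop := out = same_a_alt lst
instance (lst : List String) (out : Bool) : Decidable (Spec_same_a lst out) := by unfold Spec_same_a; infer_instance

-- ===== CLAIM (what is proved, stated in full; the proofs are below) =====
def Claim_equal_same_a : Prop := ∀ (lst : List String), Dom_same_a lst → Spec_same_a lst (same_a lst)

-- ===== LEMMAS AND PROOFS =====

-- A's loop with fixed reference c is `all (= c)`
theorem same_aLoop_some (xs : List String) (c : Nat) :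
    same_aLoop xs (some c) = xs.all (fun x => decide (PySem.Str.count x "a" = c)) := by
  induction xs with
  | nil => rfl
  | cons x xs ih =>
    simp only [same_aLoop, List.all_cons, ih]
    by_cases h : PySem.Str.count x "a" = c <;> simp [h] <;> rfl

-- tail = dropLast on c :: l  ↔  every element of l equals c (transitivity of adjacent equality)
theorem tail_eq_dropLast_iff (l : List Nat) :
    ∀ c, (l = (c :: l).dropLast) ↔ (∀ y ∈ l, y = c) := by
  induction l with
  | nil => intro c; simp
  | cons y l ih =>
    intro c
    have h : (c :: y :: l).dropLast = c :: (y :: l).dropLast := by simp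
    rw [h]
    constructor
    · rintro heq
      obtain ⟨rfl, hl⟩ := List.cons.inj heq
      intro z hz
      rcases List.mem_cons.mp hz with rfl | hz
      · rfl
      · exact (ih y).mp hl z hz
    · intro hall
      have hyc : y = c := hall y (by simp)
      subst hyc
      have : ∀ z ∈ l, z = y := fun z hz => hall z (List.mem_cons_of_mem _ hz)
      have := (ih y).mpr this
      exact congrArg (y :: ·) this

-- ===== VERDICT (by name: the statement is the Claim_ definition above) =====
theorem same_a_spec : Claim_equal_same_a := by
  intro lst _
  unfold Spec_same_a same_a same_a_alt
  cases lst with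
  | nil => rfl
  | cons x xs =>
    simp only [List.map_cons, PySem.List.slice_from_one, PySem.List.slice_to_neg_one,
      List.tail_cons]
    simp only [same_aLoop]
    rw [if_neg (by simp)]
    rw [same_aLoop_some]
    have hB := tail_eq_dropLast_iff (xs.map (fun s => PySem.Str.count s "a"))
      (PySem.Str.count x "a")
    by_cases hall : ∀ y ∈ xs, PySem.Str.count y "a" = PySem.Str.count x "a"
    · have h2 : ∀ y ∈ xs.map (fun s => PySem.Str.count s "a"), y = PySem.Str.count x "a" := by
        intro y hy; rcases List.mem_map.mp hy with ⟨s, hs, rfl⟩; exact hall s hs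
      have h1 : (xs.all (fun s => decide (PySem.Str.count s "a" = PySem.Str.count x "a"))) = true := by
        simp only [List.all_eq_true, decide_eq_true_eq]; exact hall
      rw [h1]
      exact (decide_eq_true (hB.mpr h2)).symm
    · have h2 : ¬ ((xs.map (fun s => PySem.Str.count s "a")) =
          (PySem.Str.count x "a" :: xs.map (fun s => PySem.Str.count s "a")).dropLast) := by
        intro hle
        exact hall (fun y hy => hB.mp hle _ (List.mem_map.mpr ⟨y, hy, rfl⟩))
      have h1 : (xs.all (fun s => decide (PySem.Str.count s "a" = PySem.Str.count x "a"))) = false := by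
        rw [List.all_eq_false]
        push_neg at hall
        rcases hall with ⟨y, hy, hne⟩
        exact ⟨y, hy, by simpa using hne⟩
      rw [h1]
      exact (decide_eq_false h2).symm
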